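-- pv_equiv track=rewrite | github.com/AlexVOiceover/Params-parser | ui/app.py | _build_groups
-- ===== SOURCE A (Python) =====
-- def _resolve_group(name: str, pdef_groups: list[str]) -> str:
--     """Find which ArduPilot pdef group a param belongs to.
--
--     Matches the longest pdef group prefix (e.g. "BARO1_" beats "BARO_").
--     Falls back to the first underscore-delimited segment if no pdef match.
--     """
--     best_len = 0
--     best     = ""
--     for g in pdef_groups:
--         g_prefix = g.rstrip("_")
--         if not g_prefix:
--             continue
--         # Exact match or proper prefix (followed by underscore or digit)
--         if name == g_prefix or name.startswith(g_prefix + "_"):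
--             if len(g_prefix) > best_len:
--                 best_len = len(g_prefix)
--                 best     = g_prefix
--     if best:
--         return best
--     # Fallback: first underscore segment, or whole name if no underscore
--     return name.split("_")[0] if "_" in name else name
--
-- def _build_groups(
--     params: list[tuple[str, str]],
--     pdef_groups: list[str],
-- ) -> dict[str, list[tuple[str, str]]]:
--     """Return OrderedDict {group_label: [(name, value), ...]} sorted alpha."""
--     result: dict[str, list] = {}
--     for name, value in params:
--         g = _resolve_group(name, pdef_groups)
--         result.setdefault(g, []).append((name, value))
--     return dict(sorted(result.items()))
-- ===== SOURCE B (Python) =====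
-- def _build_groups(params, pdef_groups):
--     """Label every param once, then build the result as a comprehension over
--     the sorted set of labels (group-by via filter per key)."""
--     prefixes = [p for p in (g.rstrip("_") for g in pdef_groups) if p]
--
--     def label(name):
--         cands = [p for p in prefixes if name == p or name.startswith(p + "_")]
--         if cands:
--             return max(cands, key=len)
--         return name.split("_")[0] if "_" in name else name
--
--     labels = [label(name) for name, _ in params]
--     return {k: [pair for pair, g in zip(params, labels) if g == k]
--             for k in sorted(set(labels))}
-- ===== Notes on version B (the rewrite author's own statement) =====
-- stated objective: alternative
-- what changed: Instead of resolving each param with a best-so-far scan and growing an ordered dict via setdefault/append then sorting its items, B pre-cleans the prefixes once, labels each param with max(matching-prefixes, key=len), and builds the output directly as a comprehension over sorted(set(labels)) that filters the zipped param/label list per key.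
import Mathlib
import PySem

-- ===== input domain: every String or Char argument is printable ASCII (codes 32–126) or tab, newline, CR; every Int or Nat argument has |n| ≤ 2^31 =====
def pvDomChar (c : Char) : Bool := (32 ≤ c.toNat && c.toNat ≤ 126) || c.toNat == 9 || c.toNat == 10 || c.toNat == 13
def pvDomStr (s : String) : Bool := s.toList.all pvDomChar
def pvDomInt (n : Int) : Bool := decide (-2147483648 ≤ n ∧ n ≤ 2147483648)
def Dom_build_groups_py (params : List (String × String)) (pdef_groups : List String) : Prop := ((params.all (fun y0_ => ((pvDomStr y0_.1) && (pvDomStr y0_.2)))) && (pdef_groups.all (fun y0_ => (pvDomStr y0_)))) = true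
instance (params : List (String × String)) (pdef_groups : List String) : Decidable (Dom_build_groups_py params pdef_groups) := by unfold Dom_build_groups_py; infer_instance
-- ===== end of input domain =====

-- B re-groups by a comprehension over sorted(set(labels)) with one label pass, instead of A's
-- best-so-far scan per param feeding a setdefault/append dict that is sorted afterwards (objective: alternative).

-- ===== PORT A =====
-- hand port of Python's  s.rstrip("_")  (no PySem rstrip-with-chars): drops exactly the trailing '_' characters — exact
def pvRstripU (cs : List Char) : List Char := (cs.reverse.dropWhile (· == '_')).reverse

-- port of _resolve_group, on code-point lists
def pvResolveGroup (name : List Char) (pdef_groups : List String) : List Char :=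
  let r := pdef_groups.foldl
    (fun (acc : Nat × List Char) g =>
      let gp := pvRstripU g.toList
      if gp = [] then acc
      else if name = gp ∨ PySem.Chars.startswith name (gp ++ ['_']) then
        if gp.length > acc.1 then (gp.length, gp) else acc
      else acc)
    (0, [])
  if r.2 ≠ [] then r.2
  -- name.split("_")[0]: split never returns an empty list, so headD is exact
  else if PySem.Chars.isIn ['_'] name then (PySem.Chars.splitOn name ['_']).headD [] else name

def build_groups_py (params : List (String × String)) (pdef_groups : List String) : List (String × List (String × String)) :=
  let result := params.foldl
    (fun (d : PySem.Dict String (List (String × String))) p =>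
      let g := String.ofList (pvResolveGroup p.1.toList pdef_groups)
      -- result.setdefault(g, []).append(p)  =  d[g] = d.get(g, []) ++ [p]
      d.modify g [] (fun l => l ++ [p]))
    PySem.Dict.empty
  -- sorted(result.items()): dict keys are distinct, so Python's tuple comparison only ever reads the key
  PySem.List.sorted result.items (fun kv => kv.1) false

-- ===== PORT B =====
-- port of Source B's label(), on code-point lists
def pvLabel (prefixes : List (List Char)) (name : List Char) : List Char :=
  let cands := prefixes.filter (fun p => name == p || PySem.Chars.startswith name (p ++ ['_']))
  if cands ≠ [] then PySem.List.maxD cands (fun p => p.length) []  -- max(cands, key=len), guarded nonempty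
  -- name.split("_")[0]: split never returns an empty list, so headD is exact
  else if PySem.Chars.isIn ['_'] name then (PySem.Chars.splitOn name ['_']).headD [] else name

def build_groups_py_alt (params : List (String × String)) (pdef_groups : List String) : List (String × List (String × String)) :=
  let prefixes := (pdef_groups.map (fun g => pvRstripU g.toList)).filter (fun p => decide (p ≠ []))
  let labels := params.map (fun p => String.ofList (pvLabel prefixes p.1.toList))
  (PySem.List.sorted (PySem.Set.ofList labels) (fun k => k) false).map
    (fun k => (k, ((params.zip labels).filter (fun pg => pg.2 == k)).map (fun pg => pg.1)))

-- ===== PRECONDITION & SPEC =====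
def Spec_build_groups_py (params : List (String × String)) (pdef_groups : List String) (out : List (String × List (String × String))) : Prop := out = build_groups_py_alt params pdef_groups
instance (params : List (String × String)) (pdef_groups : List String) (out : List (String × List (String × String))) : Decidable (Spec_build_groups_py params pdef_groups out) := by unfold Spec_build_groups_py; infer_instance

-- ===== CLAIM (what is proved, stated in full; the proofs are below) =====
def Claim_equal_build_groups_py : Prop := ∀ (params : List (String × String)) (pdef_groups : List String), Dom_build_groups_py params pdef_groups → Spec_build_groups_py params pdef_groups (build_groups_py params pdef_groups)

-- ===== LEMMAS AND PROOFS =====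

-- keep-the-longest step of A's scan, plain form
def pvPick (m p : List Char) : List Char := if m.length < p.length then p else m

lemma pvFold_pair (l : List (List Char)) (b : List Char) :
    l.foldl (fun (acc : Nat × List Char) p => if p.length > acc.1 then (p.length, p) else acc) (b.length, b)
      = ((l.foldl pvPick b).length, l.foldl pvPick b) := by
  induction l generalizing b with
  | nil => rfl
  | cons p rest ih =>
    simp only [List.foldl_cons]
    have h : (if p.length > b.length then (p.length, p) else (b.length, b))
        = ((pvPick b p).length, pvPick b p) := by
      unfold pvPick; split_ifs <;> rfl
    rw [h, ih]

lemma pvFold_pick_len (l : List (List Char)) (b : List Char) :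
    b.length ≤ (l.foldl pvPick b).length := by
  induction l generalizing b with
  | nil => simp
  | cons p rest ih =>
    simp only [List.foldl_cons]
    refine le_trans ?_ (ih (pvPick b p))
    unfold pvPick; split_ifs with h
    · omega
    · rfl

lemma pvMax?_cons (c : List Char) (rest : List (List Char)) :
    PySem.List.max? (c :: rest) (fun p => p.length) = some (rest.foldl pvPick c) := by
  unfold PySem.List.max?
  simp only [List.foldl_cons]
  induction rest generalizing c with
  | nil => rfl
  | cons p l ih =>
    simp only [List.foldl_cons]
    by_cases h : c.length < p.length
    · simpa [pvPick, h] using ih p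
    · simpa [pvPick, h] using ih c

lemma pvFold_filter (name : List Char) (gs : List String) (acc : Nat × List Char) :
    gs.foldl
      (fun (acc : Nat × List Char) g =>
        let gp := pvRstripU g.toList
        if gp = [] then acc
        else if name = gp ∨ PySem.Chars.startswith name (gp ++ ['_']) then
          if gp.length > acc.1 then (gp.length, gp) else acc
        else acc) acc
    = (((gs.map (fun g => pvRstripU g.toList)).filter (fun p => decide (p ≠ []))).filter
        (fun p => name == p || PySem.Chars.startswith name (p ++ ['_']))).foldl
        (fun acc p => if p.length > acc.1 then (p.length, p) else acc) acc := by
  induction gs generalizing acc with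
  | nil => rfl
  | cons g gs ih =>
    simp only [List.map_cons, List.foldl_cons]
    by_cases h1 : pvRstripU g.toList = []
    · simp [h1, ih]
    · by_cases h2 : name = pvRstripU g.toList ∨ PySem.Chars.startswith name (pvRstripU g.toList ++ ['_']) = true
      · have hb : (name == pvRstripU g.toList || PySem.Chars.startswith name (pvRstripU g.toList ++ ['_'])) = true := by
          rcases h2 with h | h
          · simp [h]
          · simp [h]
        simp [h1, h2, hb, ih]
      · have hb : (name == pvRstripU g.toList || PySem.Chars.startswith name (pvRstripU g.toList ++ ['_'])) = false := by
          push Not at h2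
          simp [h2.1, h2.2]
        simp [h1, h2, hb, ih]

lemma pvResolve_eq_label (name : List Char) (gs : List String) :
    pvResolveGroup name gs
      = pvLabel ((gs.map (fun g => pvRstripU g.toList)).filter (fun p => decide (p ≠ []))) name := by
  unfold pvResolveGroup pvLabel
  rw [pvFold_filter]
  cases hc : ((gs.map (fun g => pvRstripU g.toList)).filter (fun p => decide (p ≠ []))).filter
      (fun p => name == p || PySem.Chars.startswith name (p ++ ['_'])) with
  | nil => simp
  | cons c rest =>
    have hcmem : c ∈ (gs.map (fun g => pvRstripU g.toList)).filter (fun p => decide (p ≠ [])) := by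
      have : c ∈ ((gs.map (fun g => pvRstripU g.toList)).filter (fun p => decide (p ≠ []))).filter
          (fun p => name == p || PySem.Chars.startswith name (p ++ ['_'])) := by
        rw [hc]; exact List.mem_cons_self
      exact (List.mem_filter.mp this).1
    have hcne : c ≠ [] := by
      have := (List.mem_filter.mp hcmem).2
      simpa using this
    have hclen : 0 < c.length := List.length_pos_iff.mpr hcne

    simp only [List.foldl_cons]
    have hstep : (if c.length > (0, ([] : List Char)).1 then (c.length, c) else (0, ([] : List Char)))
        = (c.length, c) := by simp [hclen]
    rw [hstep, pvFold_pair]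
    have hM : 0 < (rest.foldl pvPick c).length := lt_of_lt_of_le hclen (pvFold_pick_len rest c)
    have hMne : rest.foldl pvPick c ≠ [] := by
      intro h; rw [h] at hM; simp at hM
    simp [hMne, PySem.List.maxD, pvMax?_cons]

lemma pvItems (params : List (String × String)) (gs : List String) :
    (params.foldl (fun (d : PySem.Dict String (List (String × String))) p =>
        d.modify (String.ofList (pvResolveGroup p.1.toList gs)) [] (fun l => l ++ [p]))
        PySem.Dict.empty).items
    = (PySem.Set.ofList (params.map (fun p => String.ofList (pvResolveGroup p.1.toList gs)))).map
        (fun k => (k, params.filter (fun p => String.ofList (pvResolveGroup p.1.toList gs) == k))) := by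
  have hkeys : (params.foldl (fun (d : PySem.Dict String (List (String × String))) p =>
        d.modify (String.ofList (pvResolveGroup p.1.toList gs)) [] (fun l => l ++ [p]))
        PySem.Dict.empty).keys
      = PySem.Set.ofList (params.map (fun p => String.ofList (pvResolveGroup p.1.toList gs))) := by
    rw [PySem.Dict.keys_foldl_modify_key params
      (fun p => String.ofList (pvResolveGroup p.1.toList gs)) []
      (fun _ p => fun l => l ++ [p]) PySem.Dict.empty]
    simp [PySem.Set.update, PySem.Set.ofList_eq_foldl]
  have hnodup : (params.foldl (fun (d : PySem.Dict String (List (String × String))) p =>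
        d.modify (String.ofList (pvResolveGroup p.1.toList gs)) [] (fun l => l ++ [p]))
        PySem.Dict.empty).keys.Nodup :=
    PySem.Dict.nodup_keys_foldl_modify_key params
      (fun p => String.ofList (pvResolveGroup p.1.toList gs)) []
      (fun _ p => fun l => l ++ [p]) PySem.Dict.empty (by simp)
  rw [PySem.Dict.items_eq_map_keys _ hnodup [], hkeys]
  have hget : ∀ k, (params.foldl (fun (d : PySem.Dict String (List (String × String))) p =>
        d.modify (String.ofList (pvResolveGroup p.1.toList gs)) [] (fun l => l ++ [p]))
        PySem.Dict.empty).getD k []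
      = params.filter (fun p => String.ofList (pvResolveGroup p.1.toList gs) == k) := by
    intro k
    have h1 : params.foldl (fun (d : PySem.Dict String (List (String × String))) p =>
          d.modify (String.ofList (pvResolveGroup p.1.toList gs)) [] (fun l => l ++ [p]))
          PySem.Dict.empty
        = (params.map (fun p => (String.ofList (pvResolveGroup p.1.toList gs), p))).foldl
            (fun d q => d.modify q.1 [] (fun l => l ++ [q.2])) PySem.Dict.empty := by
      rw [List.foldl_map]
    rw [h1, PySem.Dict.getD_foldl_modify_append]
    simp [List.filter_map, List.map_map, Function.comp_def]
  simp only [hget]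

lemma pvSorted (labels : List String) (F : String → List (String × String)) :
    PySem.List.sorted ((PySem.Set.ofList labels).map (fun k => (k, F k))) (fun kv => kv.1) false
    = (PySem.List.sorted (PySem.Set.ofList labels) (fun k => k) false).map (fun k => (k, F k)) := by
  apply PySem.List.sorted_eq_of_perm_of_pairwise_lt
  · exact (PySem.List.sorted_perm (PySem.Set.ofList labels) (fun k => k) false).map _
  · exact List.Pairwise.map _ (fun a b h => h) (PySem.List.sorted_ofList_pairwise_lt labels)

lemma pvZipFilter (params : List (String × String)) (L : (String × String) → String) (k : String) :
    ((params.zip (params.map L)).filter (fun pg => pg.2 == k)).map (fun pg => pg.1)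
      = params.filter (fun p => L p == k) := by
  induction params with
  | nil => rfl
  | cons p ps ih =>
    by_cases h : L p == k <;> simp [List.filter, h, ih]


-- ===== VERDICT (by name: the statement is the Claim_ definition above) =====
theorem build_groups_py_spec : Claim_equal_build_groups_py := by
  intro params gs _
  unfold Spec_build_groups_py build_groups_py build_groups_py_alt
  have hL : ∀ p : String × String,
      String.ofList (pvLabel ((gs.map (fun g => pvRstripU g.toList)).filter (fun p => decide (p ≠ []))) p.1.toList)
        = String.ofList (pvResolveGroup p.1.toList gs) := fun p => by rw [pvResolve_eq_label]
  simp only [hL]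
  rw [pvItems params gs, pvSorted]
  refine List.map_congr_left ?_
  intro k _
  rw [pvZipFilter params (fun p => String.ofList (pvResolveGroup p.1.toList gs)) k]
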